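-- pv_equiv track=rewrite | github.com/Eustaceyi/Leetcode | Binary Search and its variants.py | LeftMostBinarySearch
-- ===== SOURCE A (Python) =====
-- def LeftMostBinarySearch(nums, target):
--     lo, hi = 0, len(nums)
--     while lo < hi:
--         mid = (hi - lo)//2 + lo
--         if nums[mid] < target:
--             lo = mid + 1
--         else:
--             hi = mid
--     return lo
-- ===== SOURCE B (Python) =====
-- def LeftMostBinarySearch(nums, target):
--     # Divide-and-conquer on list slices: recurse on the half that may contain
--     # the leftmost insertion point, adding the offset of the right half.
--     def go(seg):
--         if not seg:
--             return 0
--         mid = len(seg) // 2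
--         if seg[mid] < target:
--             return mid + 1 + go(seg[mid + 1:])
--         return go(seg[:mid])
--     return go(nums)
-- ===== Notes on version B (the rewrite author's own statement) =====
-- stated objective: alternative
-- what changed: Replaces the in-place lo/hi while-loop with a divide-and-conquer recursion over list slices that returns the offset into the chosen half.
import Mathlib
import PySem

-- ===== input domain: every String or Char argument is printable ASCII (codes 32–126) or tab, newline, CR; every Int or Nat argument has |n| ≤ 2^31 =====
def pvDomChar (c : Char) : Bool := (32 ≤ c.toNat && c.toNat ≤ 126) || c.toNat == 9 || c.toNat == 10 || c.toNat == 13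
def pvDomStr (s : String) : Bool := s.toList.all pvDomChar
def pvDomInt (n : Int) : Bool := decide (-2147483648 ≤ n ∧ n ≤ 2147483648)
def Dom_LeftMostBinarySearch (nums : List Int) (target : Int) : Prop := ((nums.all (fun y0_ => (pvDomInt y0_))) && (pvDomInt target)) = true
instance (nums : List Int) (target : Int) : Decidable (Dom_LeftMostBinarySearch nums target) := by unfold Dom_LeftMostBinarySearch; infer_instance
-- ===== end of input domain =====

-- B replaces A's in-place lo/hi while-loop by a divide-and-conquer recursion over
-- list slices (alternative decomposition; no speed claim).

-- ===== PORT A =====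
-- A's while-loop over the mutable window [lo, hi).  lo and hi start at 0 and
-- len(nums) and stay in [0, len nums] (mid lies between them), so they are
-- carried as Nat; nums[mid], taken only when lo ≤ mid < hi ≤ len, is
-- nums.getD mid 0 (in range), and (hi-lo)//2 on nonnegative ints is Nat division.
def lmbsGoA (nums : List Int) (target : Int) (lo hi : Nat) : Int :=
  if h : lo < hi then
    let mid := (hi - lo) / 2 + lo
    if nums.getD mid 0 < target then
      lmbsGoA nums target (mid + 1) hi
    else
      lmbsGoA nums target lo mid
  else
    (lo : Int)
termination_by hi - lo
decreasing_by all_goals omega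

def LeftMostBinarySearch (nums : List Int) (target : Int) : Int :=
  lmbsGoA nums target 0 nums.length

-- ===== PORT B =====
-- B's recursive helper on the list segment itself.  The slices seg[mid+1:] and
-- seg[:mid] have nonnegative in-range bounds, so they are exactly drop/take
-- (PySem.List.slice_from_natCast / slice_to_natCast); seg[mid] with
-- mid = len(seg)//2 < len(seg) is seg.getD mid 0 (in range).
def lmbsGoB (target : Int) (seg : List Int) : Int :=
  if h : seg.isEmpty then 0
  else
    let mid := seg.length / 2
    if seg.getD mid 0 < target then
      ((mid : Int) + 1) + lmbsGoB target (seg.drop (mid + 1))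
    else
      lmbsGoB target (seg.take mid)
termination_by seg.length
decreasing_by
  all_goals
    have hlen0 : seg.length ≠ 0 := fun h0 => h (by simp [List.length_eq_zero_iff.mp h0])
    simp [List.length_drop, List.length_take]
    omega

def LeftMostBinarySearch_alt (nums : List Int) (target : Int) : Int :=
  lmbsGoB target nums

-- ===== PRECONDITION & SPEC =====
def Spec_LeftMostBinarySearch (nums : List Int) (target : Int) (out : Int) : Prop := out = LeftMostBinarySearch_alt nums target
instance (nums : List Int) (target : Int) (out : Int) : Decidable (Spec_LeftMostBinarySearch nums target out) := by unfold Spec_LeftMostBinarySearch; infer_instance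

-- ===== CLAIM (what is proved, stated in full; the proofs are below) =====
def Claim_equal_LeftMostBinarySearch : Prop := ∀ (nums : List Int) (target : Int), Dom_LeftMostBinarySearch nums target → Spec_LeftMostBinarySearch nums target (LeftMostBinarySearch nums target)

-- ===== LEMMAS AND PROOFS =====

-- Window invariant: A's loop on [lo, hi) equals lo plus B's recursion on the
-- segment nums[lo:hi], by strong induction on the window width hi - lo.
lemma lmbsGo_eq (nums : List Int) (target : Int) :
    ∀ n lo hi, hi - lo = n → lo ≤ hi → hi ≤ nums.length →
      lmbsGoA nums target lo hi = (lo : Int) + lmbsGoB target ((nums.drop lo).take (hi - lo)) := by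
  intro n
  induction n using Nat.strong_induction_on with
  | _ n ih =>
    intro lo hi hn hlh hhl
    rw [lmbsGoA, lmbsGoB]
    have hlen : ((nums.drop lo).take (hi - lo)).length = hi - lo := by
      simp [List.length_take, List.length_drop]; omega
    by_cases h : lo < hi
    · have hne : ¬ ((nums.drop lo).take (hi - lo)).isEmpty = true := by
        rw [List.isEmpty_iff, ← List.length_eq_zero_iff, hlen]; omega
      have hmid : ((nums.drop lo).take (hi - lo)).length / 2 = (hi - lo) / 2 := by rw [hlen]
      have hm : (hi - lo) / 2 < hi - lo := by omega
      have hidx : ((nums.drop lo).take (hi - lo)).getD ((hi - lo) / 2) 0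
          = nums.getD ((hi - lo) / 2 + lo) 0 := by
        rw [List.getD_eq_getElem?_getD, List.getD_eq_getElem?_getD,
            List.getElem?_take, List.getElem?_drop]
        rw [if_pos hm]
        congr 2
        omega
      simp only [dif_pos h, dif_neg hne, hmid, hidx]
      by_cases hc : nums.getD ((hi - lo) / 2 + lo) 0 < target
      · simp only [if_pos hc]
        rw [ih (hi - ((hi - lo) / 2 + lo + 1)) (by omega) ((hi - lo) / 2 + lo + 1) hi rfl
            (by omega) hhl]
        have hdrop : ((nums.drop lo).take (hi - lo)).drop ((hi - lo) / 2 + 1)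
            = (nums.drop ((hi - lo) / 2 + lo + 1)).take (hi - ((hi - lo) / 2 + lo + 1)) := by
          rw [List.drop_take, List.drop_drop]
          have e1 : lo + ((hi - lo) / 2 + 1) = (hi - lo) / 2 + lo + 1 := by omega
          have e2 : hi - lo - ((hi - lo) / 2 + 1) = hi - ((hi - lo) / 2 + lo + 1) := by omega
          rw [e1, e2]
        rw [hdrop]
        push_cast
        ring
      · simp only [if_neg hc]
        rw [ih (((hi - lo) / 2 + lo) - lo) (by omega) lo ((hi - lo) / 2 + lo) rfl
            (by omega) (by omega)]
        have htake : ((nums.drop lo).take (hi - lo)).take ((hi - lo) / 2)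
            = (nums.drop lo).take (((hi - lo) / 2 + lo) - lo) := by
          rw [List.take_take]
          congr 1
          omega
        rw [htake]
    · have he : ((nums.drop lo).take (hi - lo)).isEmpty = true := by
        rw [List.isEmpty_iff, ← List.length_eq_zero_iff, hlen]; omega
      simp [dif_neg h, he]

-- ===== VERDICT (by name: the statement is the Claim_ definition above) =====
theorem LeftMostBinarySearch_spec : Claim_equal_LeftMostBinarySearch := by
  intro nums target _
  show LeftMostBinarySearch nums target = LeftMostBinarySearch_alt nums target
  unfold LeftMostBinarySearch LeftMostBinarySearch_alt
  rw [lmbsGo_eq nums target (nums.length - 0) 0 nums.length rfl (by omega) le_rfl]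
  simp
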